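-- pv_equiv track=rewrite | github.com/jrh-dev/AdventOfCode2024 | d02.py | valid_desc
-- ===== SOURCE A (Python) =====
-- from typing import List
--
-- def valid_desc(seq: List[int], tolerence: int, allow_skip: bool) -> bool:
--     for i in range(1, len(seq)):
--         if not(seq[i] < seq[i - 1] and seq[i] > (seq[i - 1] - tolerence - 1)):
--             if allow_skip:
--                 for i in range(0, len(seq)):
--                     adj_seq = seq[:]
--                     del adj_seq[i]
--                     if valid_desc(adj_seq, tolerence, False):
--                         return True
--             return False
--     return True
-- ===== SOURCE B (Python) =====
-- def valid_desc(seq, tolerence, allow_skip):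
--     def ok(s):
--         return all(b < a <= b + tolerence for a, b in zip(s, s[1:]))
--     if ok(seq):
--         return True
--     if not allow_skip:
--         return False
--     j = next(i for i in range(1, len(seq))
--              if not (seq[i] < seq[i - 1] <= seq[i] + tolerence))
--     return ok(seq[:j - 1] + seq[j:]) or ok(seq[:j] + seq[j + 1:])
-- ===== Notes on version B (the rewrite author's own statement) =====
-- stated objective: alternative
-- what changed: Instead of retrying the full scan after deleting every possible index, B scans once, locates the first violating adjacent pair, and rechecks only the two deletions that can help (either end of that pair).
import Mathlib
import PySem

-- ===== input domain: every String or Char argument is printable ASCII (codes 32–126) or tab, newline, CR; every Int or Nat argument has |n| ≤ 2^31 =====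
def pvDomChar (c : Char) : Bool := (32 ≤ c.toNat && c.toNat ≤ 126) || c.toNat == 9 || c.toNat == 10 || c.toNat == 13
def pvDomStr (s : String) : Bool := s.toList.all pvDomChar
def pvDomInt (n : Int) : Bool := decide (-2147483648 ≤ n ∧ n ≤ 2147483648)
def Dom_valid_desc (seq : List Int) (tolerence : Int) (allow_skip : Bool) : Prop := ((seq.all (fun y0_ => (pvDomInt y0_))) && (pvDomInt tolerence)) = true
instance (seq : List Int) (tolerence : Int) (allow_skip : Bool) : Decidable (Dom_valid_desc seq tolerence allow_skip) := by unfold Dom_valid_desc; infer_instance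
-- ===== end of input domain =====

-- B replaces A's try-every-deletion recursion by one scan that locates the first violating
-- adjacent pair and rechecks only the two deletions at that pair (only those can help).

-- ===== PORT A =====
-- A's outer for-loop over range(1, len(seq)) returns False/skips as soon as one pair
-- fails, and the skip branch does not depend on which pair failed, so the loop is
-- "all pairs pass → True, otherwise the skip branch".  All indices are in range, so
-- Python seq[i] is plain indexing (getD); `del adj_seq[i]` with 0 ≤ i < len is List.eraseIdx.
def valid_desc (seq : List Int) (tolerence : Int) (allow_skip : Bool) : Bool :=
  if (List.range' 1 (seq.length - 1)).all (fun i =>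
       decide (seq.getD i 0 < seq.getD (i - 1) 0 ∧
               seq.getD i 0 > seq.getD (i - 1) 0 - tolerence - 1)) then
    true
  else if allow_skip then
    (List.range seq.length).attach.any (fun i =>
      valid_desc (seq.eraseIdx i.1) tolerence false)
  else
    false
termination_by seq.length
decreasing_by
  have h := List.mem_range.mp i.2
  simp only [List.length_eraseIdx]
  split <;> omega

-- ===== PORT B =====
-- Source B's ok(s): all(b < a <= b + tolerence for a, b in zip(s, s[1:]))
def okB (s : List Int) (tolerence : Int) : Bool :=
  (s.zip (s.drop 1)).all (fun p => decide (p.2 < p.1 ∧ p.1 ≤ p.2 + tolerence))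

def valid_desc_alt (seq : List Int) (tolerence : Int) (allow_skip : Bool) : Bool :=
  if okB seq tolerence then true
  else if !allow_skip then false
  else
    -- j = next(i for i in range(1, len(seq)) if not (seq[i] < seq[i-1] <= seq[i] + tolerence))
    match (List.range' 1 (seq.length - 1)).find? (fun j =>
        !(decide (seq.getD j 0 < seq.getD (j - 1) 0 ∧
                  seq.getD (j - 1) 0 ≤ seq.getD j 0 + tolerence))) with
    | some j =>
        okB (seq.take (j - 1) ++ seq.drop j) tolerence ||
        okB (seq.take j ++ seq.drop (j + 1)) tolerence
    | none => false  -- unreachable totality case: okB seq = false guarantees a bad pair exists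

-- ===== PRECONDITION & SPEC =====
def Spec_valid_desc (seq : List Int) (tolerence : Int) (allow_skip : Bool) (out : Bool) : Prop := out = valid_desc_alt seq tolerence allow_skip
instance (seq : List Int) (tolerence : Int) (allow_skip : Bool) (out : Bool) : Decidable (Spec_valid_desc seq tolerence allow_skip out) := by unfold Spec_valid_desc; infer_instance

-- ===== CLAIM (what is proved, stated in full; the proofs are below) =====
def Claim_equal_valid_desc : Prop := ∀ (seq : List Int) (tolerence : Int) (allow_skip : Bool), Dom_valid_desc seq tolerence allow_skip → Spec_valid_desc seq tolerence allow_skip (valid_desc seq tolerence allow_skip)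

-- ===== LEMMAS AND PROOFS =====

-- the common mathematical content of both pair checks
def Good (s : List Int) (t : Int) : Prop :=
  ∀ k, (h : k + 1 < s.length) → s[k + 1] < s[k] ∧ s[k] ≤ s[k + 1] + t

theorem okB_iff (s : List Int) (t : Int) : okB s t = true ↔ Good s t := by
  unfold okB Good
  rw [List.all_eq_true]
  constructor
  · intro h k hk
    have hlen : k < (s.zip (s.drop 1)).length := by
      simp [List.length_zip]; omega
    have := h _ (List.getElem_mem hlen)
    rw [List.getElem_zip] at this
    simp only [decide_eq_true_eq, List.getElem_drop] at this
    simpa [Nat.add_comm 1 k] using this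
  · intro h p hp
    obtain ⟨i, hi, rfl⟩ := List.mem_iff_getElem.mp hp
    have hk : i + 1 < s.length := by
      simp [List.length_zip] at hi; omega
    rw [List.getElem_zip]
    simp only [decide_eq_true_eq, List.getElem_drop]
    simpa [Nat.add_comm 1 i] using h i hk

theorem scanA_iff (s : List Int) (t : Int) :
    ((List.range' 1 (s.length - 1)).all (fun i =>
       decide (s.getD i 0 < s.getD (i - 1) 0 ∧
               s.getD i 0 > s.getD (i - 1) 0 - t - 1)) = true) ↔ Good s t := by
  rw [List.all_eq_true]
  constructor
  · intro h k hk
    have hm : k + 1 ∈ List.range' 1 (s.length - 1) := by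
      rw [List.mem_range'_1]; omega
    have := h _ hm
    simp only [decide_eq_true_eq] at this
    rw [List.getD_eq_getElem s 0 (by omega : k + 1 < s.length),
        List.getD_eq_getElem s 0 (by omega : k + 1 - 1 < s.length)] at this
    simp only [Nat.add_sub_cancel] at this
    exact ⟨this.1, by omega⟩
  · intro h i hi
    rw [List.mem_range'_1] at hi
    simp only [decide_eq_true_eq]
    rw [List.getD_eq_getElem s 0 (by omega : i < s.length),
        List.getD_eq_getElem s 0 (by omega : i - 1 < s.length)]
    obtain ⟨k, rfl⟩ : ∃ k, i = k + 1 := ⟨i - 1, by omega⟩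
    simp only [Nat.add_sub_cancel]
    have := h k (by omega)
    exact ⟨this.1, by omega⟩

-- A with allow_skip = False is exactly B's ok-check
theorem valid_desc_false (s : List Int) (t : Int) : valid_desc s t false = okB s t := by
  rw [valid_desc]
  by_cases h : Good s t
  · rw [if_pos ((scanA_iff s t).mpr h)]
    exact ((okB_iff s t).mpr h).symm
  · have hok : okB s t = false := by
      cases hok : okB s t
      · rfl
      · exact absurd ((okB_iff s t).mp hok) h
    rw [if_neg (fun hc => h ((scanA_iff s t).mp hc)), hok]
    simp

-- only deleting one end of a bad pair can help
theorem erase_not_good (s : List Int) (t : Int) (j i : Nat)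
    (h1 : 1 ≤ j) (hj : j < s.length) (hi : i < s.length)
    (hbad : ¬ (s[j]'hj < s[j-1]'(by omega) ∧ s[j-1]'(by omega) ≤ s[j]'hj + t))
    (hne1 : i ≠ j - 1) (hne2 : i ≠ j) : ¬ Good (s.eraseIdx i) t := by
  intro hGood
  have hlen : (s.eraseIdx i).length = s.length - 1 := by
    simp [List.length_eraseIdx, hi]
  rcases Nat.lt_or_ge i (j - 1) with hlt | hge
  · -- deleting before the bad pair keeps it adjacent
    have hk : (j - 2) + 1 < (s.eraseIdx i).length := by omega
    have hg := hGood (j - 2) hk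
    simp only [List.getElem_eraseIdx] at hg
    rw [dif_neg (by omega), dif_neg (by omega)] at hg
    simp only [show j - 2 + 1 = j - 1 from by omega,
               show j - 1 + 1 = j from by omega] at hg
    exact hbad ⟨hg.1, hg.2⟩
  · -- i ≥ j + 1: deleting after the bad pair keeps it adjacent
    have hi' : j + 1 ≤ i := by omega
    have hk : (j - 1) + 1 < (s.eraseIdx i).length := by omega
    have hg := hGood (j - 1) hk
    simp only [List.getElem_eraseIdx] at hg
    rw [dif_pos (by omega), dif_pos (by omega)] at hg
    simp only [show j - 1 + 1 = j from by omega] at hg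
    exact hbad ⟨hg.1, hg.2⟩

-- ===== VERDICT (by name: the statement is the Claim_ definition above) =====
theorem valid_desc_spec : Claim_equal_valid_desc := by
  intro seq t allow _
  unfold Spec_valid_desc
  rw [valid_desc, valid_desc_alt]
  by_cases hG : Good seq t
  · rw [if_pos ((scanA_iff _ _).mpr hG), if_pos ((okB_iff _ _).mpr hG)]
  · have hok : okB seq t = false := by
      cases hok : okB seq t
      · rfl
      · exact absurd ((okB_iff _ _).mp hok) hG
    rw [if_neg (fun hc => hG ((scanA_iff _ _).mp hc)), hok]
    cases allow
    · simp
    · simp only [Bool.not_true, Bool.false_eq_true, if_false, if_true]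
      -- a bad pair exists
      have hex : ∃ x ∈ List.range' 1 (seq.length - 1), (fun j =>
          !(decide (seq.getD j 0 < seq.getD (j - 1) 0 ∧
                    seq.getD (j - 1) 0 ≤ seq.getD j 0 + t))) x = true := by
        have hok' := hok
        unfold okB at hok'
        rw [List.all_eq_false] at hok'
        obtain ⟨p, hp, hnp⟩ := hok'
        obtain ⟨k, hik, rfl⟩ := List.mem_iff_getElem.mp hp
        rw [List.getElem_zip] at hnp
        simp only [decide_eq_true_eq, List.getElem_drop] at hnp
        have hk : k + 1 < seq.length := by
          simp [List.length_zip] at hik; omega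
        have hbad : ¬ (seq[k + 1]'hk < seq[k]'(by omega) ∧
            seq[k]'(by omega) ≤ seq[k + 1]'hk + t) := by
          simpa [Nat.add_comm 1 k] using hnp
        have hmem : k + 1 ∈ List.range' 1 (seq.length - 1) :=
          List.mem_range'_1.mpr (by omega)
        have hpred : ¬ (seq.getD (k + 1) 0 < seq.getD (k + 1 - 1) 0 ∧
            seq.getD (k + 1 - 1) 0 ≤ seq.getD (k + 1) 0 + t) := by
          rw [List.getD_eq_getElem seq 0 (by omega : k + 1 < seq.length),
              List.getD_eq_getElem seq 0 (by omega : k + 1 - 1 < seq.length)]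
          simp only [Nat.add_sub_cancel]
          exact hbad
        refine ⟨k + 1, hmem, ?_⟩
        simp only [Bool.not_eq_true', decide_eq_false_iff_not]
        exact hpred
      obtain ⟨j, hfind⟩ := Option.isSome_iff_exists.mp (List.find?_isSome.mpr hex)
      rw [hfind]
      have hjmem := List.mem_range'_1.mp (List.mem_of_find?_eq_some hfind)
      have hj1 : 1 ≤ j := hjmem.1
      have hjlen : j < seq.length := by omega
      have hbadj : ¬ (seq[j]'hjlen < seq[j-1]'(by omega) ∧
                      seq[j-1]'(by omega) ≤ seq[j]'hjlen + t) := by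
        have hp := List.find?_some hfind
        simp only [Bool.not_eq_true', decide_eq_false_iff_not] at hp
        rw [List.getD_eq_getElem seq 0 hjlen,
            List.getD_eq_getElem seq 0 (by omega : j - 1 < seq.length)] at hp
        exact hp
      -- the two candidate deletions are eraseIdx (j-1) and eraseIdx j
      have e1 : seq.take (j - 1) ++ seq.drop j = seq.eraseIdx (j - 1) := by
        rw [List.eraseIdx_eq_take_drop_succ, show j - 1 + 1 = j from by omega]
      have e2 : seq.take j ++ seq.drop (j + 1) = seq.eraseIdx j := by
        rw [List.eraseIdx_eq_take_drop_succ]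
      simp only [e1, e2]
      rw [Bool.eq_iff_iff, List.any_eq_true, Bool.or_eq_true]
      constructor
      · rintro ⟨⟨i, hm⟩, -, hv⟩
        rw [valid_desc_false] at hv
        have hg := (okB_iff _ _).mp hv
        have hilen := List.mem_range.mp hm
        by_cases h1 : i = j - 1
        · exact Or.inl (by rw [← h1]; exact hv)
        · by_cases h2 : i = j
          · exact Or.inr (by rw [← h2]; exact hv)
          · exact absurd hg (erase_not_good seq t j i hj1 hjlen hilen hbadj h1 h2)
      · rintro (hv | hv)
        · exact ⟨⟨j - 1, List.mem_range.mpr (by omega)⟩, List.mem_attach _ _,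
            by rw [valid_desc_false]; exact hv⟩
        · exact ⟨⟨j, List.mem_range.mpr hjlen⟩, List.mem_attach _ _,
            by rw [valid_desc_false]; exact hv⟩
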